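-- pv_equiv track=rewrite | github.com/corygrube/Advent-of-Code-2023 | python/day-1/solution.py | get_digit_index
-- ===== SOURCE A (Python) =====
-- def get_digit_index(string):
-- 	"""Returns a dict index of all numeric digits (e.g. '1') and string digits (e.g. 'one') within a string.
-- 	Format: {
-- 		# index of string (int) : digit (string, e.g. '1')
-- 	}
-- 	"""
-- 	digit_index = {}
-- 	# get index of all numeric digits in string
-- 	for i, char in enumerate(string):
-- 		if char.isdigit():
-- 			digit_index[i] = char
--
-- 	# dict of possible digit strings (e.g. 'one')
-- 	digit_strings = {
-- 		"one": "1",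
-- 		"two": "2",
-- 		"three": "3",
-- 		"four": "4",
-- 		"five": "5",
-- 		"six": "6",
-- 		"seven": "7",
-- 		"eight": "8",
-- 		"nine": "9"
-- 	}
-- 	# locate all digit first and last instances of digit strings in string
-- 	for key in digit_strings.keys():
-- 		if key in string:
-- 			# left/right find used to cover case when string has >1 of the same digit string
-- 			index_left = string.find(key)
-- 			index_right = string.rfind(key)
-- 			digit_index[index_left] = digit_strings[key]
-- 			digit_index[index_right] = digit_strings[key]
--
-- 	return digit_index
-- ===== SOURCE B (Python) =====
-- def get_digit_index(string):
-- 	"""Returns a dict index of all numeric digits (e.g. '1') and string digits (e.g. 'one') within a string."""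
-- 	digit_strings = {
-- 		"one": "1",
-- 		"two": "2",
-- 		"three": "3",
-- 		"four": "4",
-- 		"five": "5",
-- 		"six": "6",
-- 		"seven": "7",
-- 		"eight": "8",
-- 		"nine": "9"
-- 	}
-- 	digit_index = {}
-- 	word_pos = {}
-- 	# ONE left-to-right pass: record digit chars, and maintain per-word
-- 	# first/last start positions instead of searching the string per word.
-- 	for i, char in enumerate(string):
-- 		if char.isdigit():
-- 			digit_index[i] = char
-- 		for word in digit_strings:
-- 			if string.startswith(word, i):
-- 				if word in word_pos:
-- 					word_pos[word] = (word_pos[word][0], i)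
-- 				else:
-- 					word_pos[word] = (i, i)
-- 	for word, value in digit_strings.items():
-- 		if word in word_pos:
-- 			first, last = word_pos[word]
-- 			digit_index[first] = value
-- 			digit_index[last] = value
-- 	return digit_index
-- ===== Notes on version B (the rewrite author's own statement) =====
-- stated objective: alternative
-- what changed: A does a digit pass plus, per spelled word, three library searches over the whole string ('in', find, rfind); B makes ONE left-to-right pass that records digit chars and maintains a per-word table of first/last start positions updated at each index, then emits the table after the pass.
import Mathlib
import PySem

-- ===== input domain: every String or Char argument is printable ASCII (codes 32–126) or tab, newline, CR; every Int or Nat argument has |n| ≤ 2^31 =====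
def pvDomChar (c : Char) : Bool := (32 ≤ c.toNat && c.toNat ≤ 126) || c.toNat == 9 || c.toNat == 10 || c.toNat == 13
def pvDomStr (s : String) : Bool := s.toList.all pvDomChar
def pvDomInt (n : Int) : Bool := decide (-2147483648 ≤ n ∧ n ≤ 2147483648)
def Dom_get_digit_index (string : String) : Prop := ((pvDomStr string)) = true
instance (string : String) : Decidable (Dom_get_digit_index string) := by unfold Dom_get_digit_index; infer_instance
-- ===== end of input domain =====

-- B replaces A's per-word library searches ('in', find, rfind) by ONE left-to-right pass
-- that maintains a first/last start-position table per spelled word (objective: alternative).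
-- ===== PORT A =====
def pvDigitStrings : List (String × String) :=
  [("one", "1"), ("two", "2"), ("three", "3"), ("four", "4"), ("five", "5"),
   ("six", "6"), ("seven", "7"), ("eight", "8"), ("nine", "9")]

def get_digit_index (string : String) : List (Int × String) :=
  let d1 : PySem.Dict Int String :=
    (PySem.List.enumerate string.toList 0).foldl
      (fun d p => if PySem.Chars.isdigit p.2 then d.insert p.1 (String.ofList [p.2]) else d)
      PySem.Dict.empty
  let d2 : PySem.Dict Int String :=
    pvDigitStrings.foldl
      (fun d kv =>
        if PySem.Str.isIn kv.1 string then
          (d.insert (PySem.Str.find string kv.1) kv.2).insert (PySem.Str.rfind string kv.1) kv.2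
        else d)
      d1
  d2.items

-- ===== PORT B =====
-- inner body of B's word loop: 'if string.startswith(word, i): word_pos[word] = …'
-- (startswith(word, i) with 0 ≤ i is exact as word prefix of drop i)
def pvStep (cs : List Char) (i : Int) (w : String) (wp : PySem.Dict String (Int × Int)) :
    PySem.Dict String (Int × Int) :=
  if PySem.Chars.startswith (cs.drop i.toNat) w.toList then
    match wp.get? w with
    | some fl => wp.insert w (fl.1, i)
    | none => wp.insert w (i, i)
  else wp

-- 'for word in digit_strings: …' inside the single pass
def pvWordStep (cs : List Char) (i : Int) (wp : PySem.Dict String (Int × Int)) :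
    PySem.Dict String (Int × Int) :=
  pvDigitStrings.foldl (fun wp kv => pvStep cs i kv.1 wp) wp

def get_digit_index_alt (string : String) : List (Int × String) :=
  let cs := string.toList
  -- one pass: digit dict and word_pos table maintained together
  let st :=
    (PySem.List.enumerate cs 0).foldl
      (fun (s : PySem.Dict Int String × PySem.Dict String (Int × Int)) p =>
        (if PySem.Chars.isdigit p.2 then s.1.insert p.1 (String.ofList [p.2]) else s.1,
         pvWordStep cs p.1 s.2))
      (PySem.Dict.empty, PySem.Dict.empty)
  -- post-pass: emit first/last of each spelled word present
  let d : PySem.Dict Int String :=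
    pvDigitStrings.foldl
      (fun d wv =>
        match st.2.get? wv.1 with
        | some fl => (d.insert fl.1 wv.2).insert fl.2 wv.2
        | none => d)
      st.1
  d.items

-- ===== PRECONDITION & SPEC =====
def Spec_get_digit_index (string : String) (out : List (Int × String)) : Prop := out = get_digit_index_alt string
instance (string : String) (out : List (Int × String)) : Decidable (Spec_get_digit_index string out) := by unfold Spec_get_digit_index; infer_instance

-- ===== CLAIM (what is proved, stated in full; the proofs are below) =====
def Claim_equal_get_digit_index : Prop := ∀ (string : String), Dom_get_digit_index string → Spec_get_digit_index string (get_digit_index string)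

-- ===== LEMMAS AND PROOFS =====

-- the effect of one pvStep on the entry of word w, seen through get?
def pvG (cs : List Char) (w : String) (o : Option (Int × Int)) (i : Int) : Option (Int × Int) :=
  if PySem.Chars.startswith (cs.drop i.toNat) w.toList then
    some (match o with | some fl => (fl.1, i) | none => (i, i))
  else o

lemma pv_step_get?_ne (cs : List Char) (i : Int) (u w : String) (wp : PySem.Dict String (Int × Int))
    (h : w ≠ u) : (pvStep cs i u wp).get? w = wp.get? w := by
  unfold pvStep
  split_ifs with hp
  · cases wp.get? u <;> simp [PySem.Dict.get?_insert_of_ne _ _ h]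
  · rfl

lemma pv_fold_get?_not_mem (cs : List Char) (i : Int) (w : String)
    (ws : List (String × String)) (wp : PySem.Dict String (Int × Int))
    (h : w ∉ ws.map (·.1)) :
    ((ws.foldl (fun wp kv => pvStep cs i kv.1 wp) wp).get? w) = wp.get? w := by
  induction ws generalizing wp with
  | nil => rfl
  | cons kv t ih =>
    simp only [List.map_cons, List.mem_cons, not_or] at h
    rw [List.foldl_cons, ih _ h.2, pv_step_get?_ne cs i kv.1 w wp h.1]

lemma pv_step_get?_self (cs : List Char) (i : Int) (w : String) (wp : PySem.Dict String (Int × Int)) :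
    (pvStep cs i w wp).get? w = pvG cs w (wp.get? w) i := by
  unfold pvStep pvG
  split_ifs with hp
  · cases wp.get? w <;> simp [PySem.Dict.get?_insert_self]
  · rfl

lemma pv_fold_get?_mem (cs : List Char) (i : Int) (w : String)
    (ws : List (String × String)) (wp : PySem.Dict String (Int × Int))
    (hnd : (ws.map (·.1)).Nodup) (hw : w ∈ ws.map (·.1)) :
    ((ws.foldl (fun wp kv => pvStep cs i kv.1 wp) wp).get? w) = pvG cs w (wp.get? w) i := by
  induction ws generalizing wp with
  | nil => simp at hw
  | cons kv t ih =>
    simp only [List.map_cons, List.nodup_cons] at hnd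
    simp only [List.map_cons, List.mem_cons] at hw
    rw [List.foldl_cons]
    rcases hw with rfl | hw
    · rw [pv_fold_get?_not_mem cs i kv.1 t _ hnd.1, pv_step_get?_self]
    · have hne : w ≠ kv.1 := fun h => hnd.1 (h ▸ hw)
      rw [ih _ hnd.2 hw, pv_step_get?_ne cs i kv.1 w wp hne]

lemma pv_pass_get? (cs : List Char) (w : String) (hw : w ∈ pvDigitStrings.map (·.1))
    (ps : List (Int × Char)) (wp : PySem.Dict String (Int × Int)) :
    ((ps.foldl (fun wp p => pvWordStep cs p.1 wp) wp).get? w) =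
      (ps.map (·.1)).foldl (pvG cs w) (wp.get? w) := by
  induction ps generalizing wp with
  | nil => rfl
  | cons p t ih =>
    rw [List.foldl_cons, ih, List.map_cons, List.foldl_cons]
    simp only [pvWordStep]
    rw [pv_fold_get?_mem cs p.1 w pvDigitStrings wp (by decide) hw]

-- rfind.go m is the greatest j ≤ m at which w is a prefix of cs.drop j, or -1 if there is none
lemma pv_rfind_go_spec (cs w : List Char) (m : Nat) :
    (PySem.Chars.rfind.go cs w m = -1 ∧ ∀ j ≤ m, ¬ w <+: cs.drop j) ∨
    (∃ j, j ≤ m ∧ PySem.Chars.rfind.go cs w m = (j : Int) ∧ w <+: cs.drop j ∧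
      ∀ i, j < i → i ≤ m → ¬ w <+: cs.drop i) := by
  induction m with
  | zero =>
    by_cases h : w.isPrefixOf cs
    · exact Or.inr ⟨0, le_refl 0, by simp [PySem.Chars.rfind.go, h],
        by simpa using List.isPrefixOf_iff_prefix.mp h, fun i hi him => by omega⟩
    · refine Or.inl ⟨by simp [PySem.Chars.rfind.go, h], ?_⟩
      intro j hj
      have : j = 0 := by omega
      subst this
      simpa using fun hp => h (List.isPrefixOf_iff_prefix.mpr (by simpa using hp))
  | succ m ih =>
    have hgo : PySem.Chars.rfind.go cs w (m+1) =
        if w.isPrefixOf (cs.drop (m+1)) then ((m+1 : Nat) : Int) else PySem.Chars.rfind.go cs w m := rfl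
    by_cases h : w.isPrefixOf (cs.drop (m+1))
    · exact Or.inr ⟨m+1, le_refl _, by rw [hgo]; simp [h],
        List.isPrefixOf_iff_prefix.mp h, fun i hi him => by omega⟩
    · rw [hgo]
      simp only [h]
      rcases ih with ⟨he, hall⟩ | ⟨j, hj, he, hpre, hmax⟩
      · refine Or.inl ⟨he, ?_⟩
        intro j hjm
        rcases Nat.lt_or_ge j (m+1) with hlt | hge
        · exact hall j (by omega)
        · have : j = m + 1 := by omega
          subst this
          exact fun hp => h (List.isPrefixOf_iff_prefix.mpr hp)
      · refine Or.inr ⟨j, by omega, he, hpre, ?_⟩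
        intro i hji him
        rcases Nat.lt_or_ge i (m+1) with hlt | hge
        · exact hmax i hji (by omega)
        · have : i = m + 1 := by omega
          subst this
          exact fun hp => h (List.isPrefixOf_iff_prefix.mpr hp)

-- the fold of pvG over [0..m): none iff no occurrence below m, else (least, greatest) occurrence
lemma pv_G_range_spec (cs : List Char) (w : String) (m : Nat) :
    ((PySem.List.pyRange 0 (m : Int)).foldl (pvG cs w) none = none ∧
      ∀ j < m, ¬ w.toList <+: cs.drop j) ∨
    (∃ f l : Nat, f ≤ l ∧ l < m ∧
      (PySem.List.pyRange 0 (m : Int)).foldl (pvG cs w) none = some ((f : Int), (l : Int)) ∧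
      w.toList <+: cs.drop f ∧ w.toList <+: cs.drop l ∧
      (∀ j < f, ¬ w.toList <+: cs.drop j) ∧ (∀ j, l < j → j < m → ¬ w.toList <+: cs.drop j)) := by
  induction m with
  | zero =>
    refine Or.inl ⟨?_, fun j hj => absurd hj (by omega)⟩
    have h0 : PySem.List.pyRange 0 ((0 : Nat) : Int) = [] := by simp [PySem.List.pyRange]
    rw [h0]
    rfl
  | succ m ih =>
    have happ : PySem.List.pyRange 0 ((m + 1 : Nat) : Int) =
        PySem.List.pyRange 0 (m : Int) ++ [(m : Int)] := by
      have : ((m + 1 : Nat) : Int) = (m : Int) + 1 := by push_cast; ring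
      rw [this]
      exact PySem.List.pyRange_one_succ_right (by positivity)
    rw [happ, List.foldl_append]
    by_cases hs : PySem.Chars.startswith (cs.drop m) w.toList
    · have hpre : w.toList <+: cs.drop m := (PySem.Chars.startswith_iff _ _).mp hs
      rcases ih with ⟨he, hall⟩ | ⟨f, l, hfl, hlm, he, hf, _, hmin, _⟩
      · refine Or.inr ⟨m, m, le_refl m, by omega, ?_, hpre, hpre, hall, fun j h1 h2 => by omega⟩
        rw [he]; simp [pvG, hs]
      · refine Or.inr ⟨f, m, by omega, by omega, ?_, hf, hpre, hmin, fun j h1 h2 => by omega⟩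
        rw [he]; simp [pvG, hs]
    · have hnpre : ¬ w.toList <+: cs.drop m := fun hp => hs ((PySem.Chars.startswith_iff _ _).mpr hp)
      rcases ih with ⟨he, hall⟩ | ⟨f, l, hfl, hlm, he, hf, hl, hmin, hmax⟩
      · refine Or.inl ⟨?_, ?_⟩
        · rw [he]; simp [pvG, hs]
        · intro j hj
          rcases Nat.lt_or_ge j m with h | h
          · exact hall j h
          · have : j = m := by omega
            subst this; exact hnpre
      · refine Or.inr ⟨f, l, hfl, by omega, ?_, hf, hl, hmin, ?_⟩
        · rw [he]; simp [pvG, hs]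
        · intro j h1 h2
          rcases Nat.lt_or_ge j m with h | h
          · exact hmax j h1 h
          · have : j = m := by omega
            subst this; exact hnpre

-- at m = len: the table entry is exactly (find, rfind), present iff the word occurs
lemma pv_G_range_find (cs : List Char) (w : String) (hw : w.toList ≠ []) :
    (PySem.List.pyRange 0 (cs.length : Int)).foldl (pvG cs w) none =
      (if PySem.Chars.isIn w.toList cs then
        some (PySem.Chars.find cs w.toList, PySem.Chars.rfind cs w.toList) else none) := by
  have hlen : ∀ j, w.toList <+: cs.drop j → j < cs.length := by
    intro j hp
    by_contra hge
    rw [List.drop_eq_nil_of_le (by omega)] at hp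
    exact hw (List.prefix_nil.mp hp)
  by_cases hin : PySem.Chars.isIn w.toList cs
  · simp only [hin, if_true]
    obtain ⟨j0, hj0⟩ := (PySem.Chars.exists_prefix_drop_iff_isIn w.toList cs).mpr hin
    rcases pv_G_range_spec cs w cs.length with ⟨_, hall⟩ | ⟨f, l, hfl, hlm, he, hf, hl, hmin, hmax⟩
    · exact absurd hj0 (hall j0 (hlen j0 hj0))
    · rw [he]
      have hfind0 : 0 ≤ PySem.Chars.find cs w.toList :=
        (PySem.Chars.find_nonneg_iff cs w.toList).mpr ((PySem.Chars.isIn_iff_infix w.toList cs).mp hin)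
      obtain ⟨hfp, hfmin⟩ := PySem.Chars.find_spec hfind0
      have hfeq : (f : Int) = PySem.Chars.find cs w.toList := by
        have h1 : ¬ f < (PySem.Chars.find cs w.toList).toNat := fun h => hfmin f h hf
        have h2 : ¬ (PySem.Chars.find cs w.toList).toNat < f := fun h => hmin _ h hfp
        omega
      rcases pv_rfind_go_spec cs w.toList cs.length with ⟨_, hall⟩ | ⟨j, hj, hgo, hjp, hjmax⟩
      · exact absurd hl (hall l (by omega))
      · have hjlt : j < cs.length := hlen j hjp
        have h1 : ¬ l < j := fun h => hmax j h hjlt hjp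
        have h2 : ¬ j < l := fun h => hjmax l h (by omega) hl
        have hleq : l = j := by omega
        have hr : PySem.Chars.rfind cs w.toList = (j : Int) := hgo
        rw [← hfeq, hr, hleq]
  · rw [if_neg hin]
    rcases pv_G_range_spec cs w cs.length with ⟨he, _⟩ | ⟨f, l, _, _, _, hf, _, _, _⟩
    · exact he
    · exact absurd ((PySem.Chars.exists_prefix_drop_iff_isIn w.toList cs).mp ⟨f, hf⟩) hin

-- B's post-pass word step equals A's find/rfind step, given the table characterization
lemma pv_last_step (d : PySem.Dict Int String) (cs : List Char) (w v : String) :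
    (match (if PySem.Chars.isIn w.toList cs then
        some (PySem.Chars.find cs w.toList, PySem.Chars.rfind cs w.toList)
      else none : Option (Int × Int)) with
     | some fl => (d.insert fl.1 v).insert fl.2 v
     | none => d) =
    if PySem.Chars.isIn w.toList cs then
      (d.insert (PySem.Chars.find cs w.toList) v).insert (PySem.Chars.rfind cs w.toList) v
    else d := by
  by_cases h : PySem.Chars.isIn w.toList cs <;> simp [h]

-- ===== VERDICT (by name: the statement is the Claim_ definition above) =====
theorem get_digit_index_spec : Claim_equal_get_digit_index := by
  intro s _
  unfold Spec_get_digit_index get_digit_index get_digit_index_alt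
  simp only
  rw [PySem.List.foldl_prod_mk
      (f := fun (d : PySem.Dict Int String) (p : Int × Char) =>
        if PySem.Chars.isdigit p.2 then d.insert p.1 (String.ofList [p.2]) else d)
      (g := fun (wp : PySem.Dict String (Int × Int)) (p : Int × Char) =>
        pvWordStep s.toList p.1 wp)]
  congr 1
  have hget : ∀ w : String, w ∈ pvDigitStrings.map (·.1) → w.toList ≠ [] →
      ((PySem.List.enumerate s.toList 0).foldl
        (fun wp p => pvWordStep s.toList p.1 wp) PySem.Dict.empty).get? w =
      (if PySem.Chars.isIn w.toList s.toList then
        some (PySem.Chars.find s.toList w.toList, PySem.Chars.rfind s.toList w.toList)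
      else none) := by
    intro w hw hne
    rw [pv_pass_get? s.toList w hw]
    have h0 : (PySem.Dict.empty : PySem.Dict String (Int × Int)).get? w = none := rfl
    rw [h0, PySem.List.map_fst_enumerate]
    simpa using pv_G_range_find s.toList w hne
  apply PySem.List.foldl_congr_mem
  intro acc x hx
  simp only [pvDigitStrings, List.mem_cons, List.not_mem_nil, or_false] at hx
  rcases hx with rfl | rfl | rfl | rfl | rfl | rfl | rfl | rfl | rfl <;>
  · rw [hget _ (by decide) (by decide)]
    simp only [PySem.Str.isIn_eq, PySem.Str.find_eq, PySem.Str.rfind_eq]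
    exact (pv_last_step acc s.toList _ _).symm
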